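-- pv_equiv track=rewrite | github.com/simeonbabatunde/Hands-on-ML-Final-Project | project5/babatunde_simeon_P4.py | spamham_word_counter
-- ===== SOURCE A (Python) =====
-- def spamham_word_counter(text, word_class, word_dictionary):
--     '''
--     This function counts how many time the each word in a text appears in ham or spam
--     Args:
--         text: text containing the words to be counted
--         word_class: This could be 0 (ham) or 1 (spam)
--         word_dictionary: A dict to keep the unique words and how often they appear in ham or spam
--     Returns:
--         A dict containing counted words
--     '''
--     for each_word in text:
--         if each_word in word_dictionary:
--             if word_class == 1:
--                 word_dictionary[each_word][1] += 1
--             else: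
--                 word_dictionary[each_word][0] += 1
--         else:
--             if word_class == 1:
--                word_dictionary[each_word] = [0, 1]
--             else:
--                word_dictionary[each_word] = [1, 0]
--
--     return word_dictionary
-- ===== SOURCE B (Python) =====
-- def spamham_word_counter(text, word_class, word_dictionary):
--     idx = 1 if word_class == 1 else 0
--     counts = {}
--     for w in text:
--         counts[w] = counts.get(w, 0) + 1
--     for k in word_dictionary:
--         c = counts.pop(k, 0)
--         if c:
--             word_dictionary[k][idx] += c
--     for w, c in counts.items():
--         word_dictionary[w] = [0, c] if idx == 1 else [c, 0]
--     return word_dictionary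
-- ===== Notes on version B (the rewrite author's own statement) =====
-- stated objective: alternative
-- what changed: Replaces A's per-occurrence dict-membership-and-increment loop by a counting pass (frequency table over text), one pass over the existing dictionary entries adding aggregated counts (popping consumed words), and one pass appending the remaining new words in first-appearance order.
import Mathlib
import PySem

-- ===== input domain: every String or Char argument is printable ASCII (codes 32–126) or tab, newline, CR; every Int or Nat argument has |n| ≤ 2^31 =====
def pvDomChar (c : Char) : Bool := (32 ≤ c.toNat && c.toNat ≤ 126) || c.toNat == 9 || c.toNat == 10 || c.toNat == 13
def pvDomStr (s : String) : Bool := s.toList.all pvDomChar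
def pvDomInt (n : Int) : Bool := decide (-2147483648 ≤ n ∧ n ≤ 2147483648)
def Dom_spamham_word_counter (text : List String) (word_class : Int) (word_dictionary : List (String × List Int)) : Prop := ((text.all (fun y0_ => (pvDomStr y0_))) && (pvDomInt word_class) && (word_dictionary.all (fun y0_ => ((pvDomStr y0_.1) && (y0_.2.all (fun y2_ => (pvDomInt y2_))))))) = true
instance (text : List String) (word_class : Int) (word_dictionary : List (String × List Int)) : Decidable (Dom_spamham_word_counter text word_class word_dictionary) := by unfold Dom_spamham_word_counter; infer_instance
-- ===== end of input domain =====

-- B replaces A's per-occurrence membership-test-and-increment loop by a frequency table over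
-- the text plus one aggregated update per distinct word (objective: alternative algorithm,
-- same cost). Both Pythons mutate word_dictionary in place and return it; the equivalence
-- proved here is about the return value.

-- ===== PORT A =====
-- v[i] += 1 (Python raises IndexError if i ≥ len(v); those inputs are outside Pre_)
def pvBump1 (v : List Int) (i : Nat) : List Int := v.set i (v.getD i 0 + 1)

-- 'each_word in word_dictionary'
def pvContains : List (String × List Int) → String → Bool
  | [], _ => false
  | (k, _) :: rest, w => k = w || pvContains rest w

-- first-match in-place value update: Python's word_dictionary[w][i] += 1
def pvUpdFirst : List (String × List Int) → String → Nat → List (String × List Int)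
  | [], _, _ => []
  | (k, v) :: rest, w, i => if k = w then (k, pvBump1 v i) :: rest else (k, v) :: pvUpdFirst rest w i

-- body of A's for-loop, branch for branch
def pvStepA (word_class : Int) (d : List (String × List Int)) (w : String) : List (String × List Int) :=
  if pvContains d w then
    if word_class = 1 then pvUpdFirst d w 1 else pvUpdFirst d w 0
  else
    if word_class = 1 then d ++ [(w, [0, 1])] else d ++ [(w, [1, 0])]

def spamham_word_counter (text : List String) (word_class : Int) (word_dictionary : List (String × List Int)) : List (String × List Int) :=
  text.foldl (pvStepA word_class) word_dictionary

-- ===== PORT B =====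
-- counts.get(w, default)-style lookup in the counter (first match)
def pvLookupC : List (String × Int) → String → Option Int
  | [], _ => none
  | (k, c) :: rest, w => if k = w then some c else pvLookupC rest w

-- counts[w] = counts.get(w, 0) + 1  (dict: update first match in place, else append)
def pvIncCount : List (String × Int) → String → List (String × Int)
  | [], w => [(w, 1)]
  | (k, c) :: rest, w => if k = w then (k, c + 1) :: rest else (k, c) :: pvIncCount rest w

-- the removal half of counts.pop(k, 0)
def pvRemoveKey : List (String × Int) → String → List (String × Int)
  | [], _ => []
  | (k', c) :: rest, k => if k' = k then rest else (k', c) :: pvRemoveKey rest k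

def pvBumpBy (v : List Int) (i : Nat) (c : Int) : List Int := v.set i (v.getD i 0 + c)

-- second loop of B: walk the existing dictionary entries, popping consumed counts
def pvPassExisting (idx : Nat) : List (String × List Int) → List (String × Int) →
    List (String × List Int) × List (String × Int)
  | [], cs => ([], cs)
  | (k, v) :: rest, cs =>
    let c := (pvLookupC cs k).getD 0                   -- c = counts.pop(k, 0) …
    let cs' := pvRemoveKey cs k
    let v' := if c = 0 then v else pvBumpBy v idx c    -- if c: word_dictionary[k][idx] += c
    let r := pvPassExisting idx rest cs'
    ((k, v') :: r.1, r.2)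

def pvMkNew (idx : Nat) (c : Int) : List Int := if idx = 1 then [0, c] else [c, 0]

def pvApplyC (idx : Nat) (cs : List (String × Int)) (d : List (String × List Int)) : List (String × List Int) :=
  let p := pvPassExisting idx d cs
  p.1 ++ p.2.map (fun wc => (wc.1, pvMkNew idx wc.2))  -- third loop: append the new words

def spamham_word_counter_alt (text : List String) (word_class : Int) (word_dictionary : List (String × List Int)) : List (String × List Int) :=
  let idx : Nat := if word_class = 1 then 1 else 0
  let counts := text.foldl pvIncCount []
  pvApplyC idx counts word_dictionary

-- ===== PRECONDITION & SPEC =====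
-- Pre_ excludes exactly the inputs on which Python A raises IndexError: a dictionary value
-- list too short for the slot being incremented (index 1 for spam, 0 for ham) while its key
-- occurs in text.
def Pre_spamham_word_counter (text : List String) (word_class : Int) (word_dictionary : List (String × List Int)) : Prop :=
  ∀ p ∈ word_dictionary, p.1 ∈ text → (if word_class = 1 then 1 else 0) < p.2.length
instance (text : List String) (word_class : Int) (word_dictionary : List (String × List Int)) : Decidable (Pre_spamham_word_counter text word_class word_dictionary) := by unfold Pre_spamham_word_counter; infer_instance

def pvWitness_spamham_word_counter : List String × Int × (List (String × List Int)) :=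
  (["spam", "ham", "spam"], 1, [("ham", [2, 0]), ("egg", [0, 3])])

def Spec_spamham_word_counter (text : List String) (word_class : Int) (word_dictionary : List (String × List Int)) (out : List (String × List Int)) : Prop := out = spamham_word_counter_alt text word_class word_dictionary
instance (text : List String) (word_class : Int) (word_dictionary : List (String × List Int)) (out : List (String × List Int)) : Decidable (Spec_spamham_word_counter text word_class word_dictionary out) := by unfold Spec_spamham_word_counter; infer_instance

-- ===== CLAIM (what is proved, stated in full; the proofs are below) =====
def Claim_equal_spamham_word_counter : Prop := ∀ (text : List String) (word_class : Int) (word_dictionary : List (String × List Int)), Dom_spamham_word_counter text word_class word_dictionary → Pre_spamham_word_counter text word_class word_dictionary → Spec_spamham_word_counter text word_class word_dictionary (spamham_word_counter text word_class word_dictionary)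

-- ===== LEMMAS AND PROOFS =====

-- A's loop body with the class already resolved to a slot index
def pvStepI (idx : Nat) (d : List (String × List Int)) (w : String) : List (String × List Int) :=
  if pvContains d w then pvUpdFirst d w idx else d ++ [(w, pvMkNew idx 1)]

theorem pvStepA_eq (word_class : Int) (d : List (String × List Int)) (w : String) :
    pvStepA word_class d w = pvStepI (if word_class = 1 then 1 else 0) d w := by
  by_cases h : word_class = 1 <;> simp [pvStepA, pvStepI, pvMkNew, h]

theorem removeKey_of_lookup_none (cs : List (String × Int)) (w : String)
    (h : pvLookupC cs w = none) : pvRemoveKey cs w = cs := by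
  induction cs with
  | nil => rfl
  | cons p rest ih =>
    obtain ⟨k, c⟩ := p
    by_cases hk : k = w
    · simp [pvLookupC, hk] at h
    · simp [pvLookupC, hk] at h
      simp [pvRemoveKey, hk, ih h]

theorem lookup_incCount_self (cs : List (String × Int)) (w : String) :
    pvLookupC (pvIncCount cs w) w = some ((pvLookupC cs w).getD 0 + 1) := by
  induction cs with
  | nil => simp [pvIncCount, pvLookupC]
  | cons p rest ih =>
    obtain ⟨k, c⟩ := p
    by_cases hk : k = w
    · simp [pvIncCount, pvLookupC, hk]
    · simp [pvIncCount, pvLookupC, hk, ih]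

theorem lookup_incCount_ne (cs : List (String × Int)) (w k : String) (hk : k ≠ w) :
    pvLookupC (pvIncCount cs w) k = pvLookupC cs k := by
  induction cs with
  | nil => simp [pvIncCount, pvLookupC, Ne.symm hk]
  | cons p rest ih =>
    obtain ⟨k', c⟩ := p
    by_cases h' : k' = w
    · subst h'
      simp [pvIncCount, pvLookupC, Ne.symm hk]
    · by_cases h'' : k' = k
      · subst h''
        simp [pvIncCount, pvLookupC, h']
      · simp [pvIncCount, pvLookupC, h', h'', ih]

theorem removeKey_incCount_self (cs : List (String × Int)) (w : String) :
    pvRemoveKey (pvIncCount cs w) w = pvRemoveKey cs w := by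
  induction cs with
  | nil => simp [pvIncCount, pvRemoveKey]
  | cons p rest ih =>
    obtain ⟨k, c⟩ := p
    by_cases hk : k = w
    · simp [pvIncCount, pvRemoveKey, hk]
    · simp [pvIncCount, pvRemoveKey, hk, ih]

theorem removeKey_incCount_ne (cs : List (String × Int)) (w k : String) (hk : k ≠ w) :
    pvRemoveKey (pvIncCount cs w) k = pvIncCount (pvRemoveKey cs k) w := by
  induction cs with
  | nil => simp [pvIncCount, pvRemoveKey, Ne.symm hk]
  | cons p rest ih =>
    obtain ⟨k', c⟩ := p
    by_cases h' : k' = w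
    · subst h'
      simp [pvIncCount, pvRemoveKey, Ne.symm hk]
    · by_cases h'' : k' = k
      · subst h''
        simp [pvIncCount, pvRemoveKey, h']
      · simp [pvIncCount, pvRemoveKey, h', h'', ih]

theorem mem_lookup_some (cs : List (String × Int)) (w : String) (c : Int)
    (h : pvLookupC cs w = some c) : (w, c) ∈ cs := by
  induction cs with
  | nil => simp [pvLookupC] at h
  | cons p rest ih =>
    obtain ⟨k, c'⟩ := p
    by_cases hk : k = w
    · subst hk
      simp [pvLookupC] at h
      simp [h]
    · simp [pvLookupC, hk] at h
      simp [ih h]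

theorem pos_incCount (cs : List (String × Int)) (w : String)
    (h : ∀ p ∈ cs, 0 < p.2) : ∀ p ∈ pvIncCount cs w, 0 < p.2 := by
  induction cs with
  | nil =>
    intro p hp
    simp [pvIncCount] at hp
    simp [hp]
  | cons q rest ih =>
    obtain ⟨k, c⟩ := q
    intro p hp
    by_cases hk : k = w
    · rw [pvIncCount, if_pos hk] at hp
      rcases List.mem_cons.1 hp with hp | hp
      · have hc : (0 : Int) < c := h (k, c) (by simp)
        simp [hp]; omega
      · exact h p (List.mem_cons_of_mem _ hp)
    · rw [pvIncCount, if_neg hk] at hp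
      rcases List.mem_cons.1 hp with hp | hp
      · exact h p (by simp [hp])
      · exact ih (fun q hq => h q (List.mem_cons_of_mem _ hq)) p hp

theorem pos_removeKey (cs : List (String × Int)) (k : String)
    (h : ∀ p ∈ cs, 0 < p.2) : ∀ p ∈ pvRemoveKey cs k, 0 < p.2 := by
  induction cs with
  | nil => intro p hp; simp [pvRemoveKey] at hp
  | cons q rest ih =>
    obtain ⟨k', c⟩ := q
    intro p hp
    by_cases hk : k' = k
    · rw [pvRemoveKey, if_pos hk] at hp
      exact h p (List.mem_cons_of_mem _ hp)
    · rw [pvRemoveKey, if_neg hk] at hp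
      rcases List.mem_cons.1 hp with hp | hp
      · exact h p (by simp [hp])
      · exact ih (fun q hq => h q (List.mem_cons_of_mem _ hq)) p hp

theorem stepI_cons_ne (idx : Nat) (k : String) (v : List Int) (d : List (String × List Int))
    (w : String) (hx : k ≠ w) : pvStepI idx ((k, v) :: d) w = (k, v) :: pvStepI idx d w := by
  simp only [pvStepI, pvContains, pvUpdFirst]
  by_cases hc : pvContains d w
  · simp [hx, hc]
  · simp [hx, hc]

theorem stepI_mapNew (idx : Nat) (cs : List (String × Int)) (w : String) (hidx : idx ≤ 1) :
    pvStepI idx (cs.map (fun wc => (wc.1, pvMkNew idx wc.2))) w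
      = (pvIncCount cs w).map (fun wc => (wc.1, pvMkNew idx wc.2)) := by
  induction cs with
  | nil => simp [pvStepI, pvContains, pvIncCount]
  | cons p rest ih =>
    obtain ⟨k, c⟩ := p
    by_cases hk : k = w
    · subst hk
      have hbump : pvBump1 (pvMkNew idx c) idx = pvMkNew idx (c + 1) := by
        interval_cases idx <;> simp [pvMkNew, pvBump1]
      simp [pvStepI, pvContains, pvUpdFirst, pvIncCount, hbump]
    · rw [List.map_cons, stepI_cons_ne idx k (pvMkNew idx c) _ w hk, ih]
      simp [pvIncCount, hk]

theorem bump_collapse (v : List Int) (idx : Nat) (c : Int) (h : idx < v.length) :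
    pvBump1 (pvBumpBy v idx c) idx = pvBumpBy v idx (c + 1) := by
  simp [pvBump1, pvBumpBy, List.getD, h, List.set_set]
  ring_nf

theorem step_lemma (idx : Nat) (d : List (String × List Int)) (cs : List (String × Int)) (w : String)
    (hidx : idx ≤ 1) (hpos : ∀ p ∈ cs, 0 < p.2)
    (hlen : ∀ p ∈ d, p.1 = w → idx < p.2.length) :
    pvStepI idx (pvApplyC idx cs d) w = pvApplyC idx (pvIncCount cs w) d := by
  induction d generalizing cs with
  | nil =>
    simpa [pvApplyC, pvPassExisting] using stepI_mapNew idx cs w hidx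
  | cons p rest ih =>
    obtain ⟨k, v⟩ := p
    by_cases hk : k = w
    · subst hk
      -- the head entry's key is exactly the word being added
      cases hlu : pvLookupC cs k with
      | none =>
        have hrm : pvRemoveKey cs k = cs := removeKey_of_lookup_none cs k hlu
        have hlu' : pvLookupC (pvIncCount cs k) k = some 1 := by
          rw [lookup_incCount_self, hlu]; rfl
        have hrm' : pvRemoveKey (pvIncCount cs k) k = cs := by
          rw [removeKey_incCount_self, hrm]
        simp only [pvApplyC, pvPassExisting, hlu, hlu', hrm, hrm',
          Option.getD_none, Option.getD_some, List.cons_append]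
        norm_num
        have hcons : ∀ tail, pvStepI idx ((k, v) :: tail) k = (k, pvBump1 v idx) :: tail := by
          intro tail; simp [pvStepI, pvContains, pvUpdFirst]
        rw [hcons]
        simp [pvBump1, pvBumpBy]
      | some c =>
        have hcpos : (0 : Int) < c := hpos (k, c) (mem_lookup_some cs k c hlu)
        have hc : ¬(c = 0) := by omega
        have hc1 : ¬(c + 1 = 0) := by omega
        have hlu' : pvLookupC (pvIncCount cs k) k = some (c + 1) := by
          rw [lookup_incCount_self, hlu]; rfl
        have hrm' : pvRemoveKey (pvIncCount cs k) k = pvRemoveKey cs k :=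
          removeKey_incCount_self cs k
        have hvlen : idx < v.length := hlen (k, v) (by simp) rfl
        simp only [pvApplyC, pvPassExisting, hlu, hlu', hrm', Option.getD_some,
          if_neg hc, if_neg hc1, List.cons_append]
        have hcons : ∀ tail, pvStepI idx ((k, pvBumpBy v idx c) :: tail) k
            = (k, pvBump1 (pvBumpBy v idx c) idx) :: tail := by
          intro tail; simp [pvStepI, pvContains, pvUpdFirst]
        rw [hcons, bump_collapse v idx c hvlen]
    · -- head key differs from w: the head entry is preserved on both sides
      have hlu : pvLookupC (pvIncCount cs w) k = pvLookupC cs k := lookup_incCount_ne cs w k hk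
      have hrm : pvRemoveKey (pvIncCount cs w) k = pvIncCount (pvRemoveKey cs k) w :=
        removeKey_incCount_ne cs w k hk
      simp only [pvApplyC, pvPassExisting, hlu, hrm, List.cons_append]
      rw [stepI_cons_ne idx k _ _ w hk]
      have ih' := ih (pvRemoveKey cs k) (pos_removeKey cs k hpos)
        (fun p hp hpw => hlen p (List.mem_cons_of_mem _ hp) hpw)
      simpa [pvApplyC] using ih'

theorem main_lemma (idx : Nat) (t : List String) (cs : List (String × Int))
    (d : List (String × List Int)) (hidx : idx ≤ 1) (hpos : ∀ p ∈ cs, 0 < p.2)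
    (hlen : ∀ p ∈ d, p.1 ∈ t → idx < p.2.length) :
    t.foldl (pvStepI idx) (pvApplyC idx cs d) = pvApplyC idx (t.foldl pvIncCount cs) d := by
  induction t generalizing cs with
  | nil => simp
  | cons w t' ih =>
    have hstep := step_lemma idx d cs w hidx hpos
      (fun p hp hpw => hlen p hp (by simp [hpw]))
    simp only [List.foldl_cons]
    rw [hstep]
    exact ih (pvIncCount cs w) (pos_incCount cs w hpos)
      (fun p hp hpt => hlen p hp (by simp [hpt]))

theorem applyC_nil (idx : Nat) (d : List (String × List Int)) :
    pvApplyC idx [] d = d := by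
  induction d with
  | nil => simp [pvApplyC, pvPassExisting]
  | cons p rest ih =>
    obtain ⟨k, v⟩ := p
    simp only [pvApplyC, pvPassExisting, pvLookupC, pvRemoveKey] at ih ⊢
    simp only [Option.getD_none, List.cons_append]
    rw [ih]
    simp

-- ===== VERDICT (by name: the statement is the Claim_ definition above) =====
theorem spamham_word_counter_spec : Claim_equal_spamham_word_counter := by
  intro text word_class word_dictionary _ hpre
  unfold Spec_spamham_word_counter spamham_word_counter spamham_word_counter_alt
  have hfold : text.foldl (pvStepA word_class) word_dictionary
      = text.foldl (pvStepI (if word_class = 1 then 1 else 0)) word_dictionary := by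
    have h : pvStepA word_class = pvStepI (if word_class = 1 then 1 else 0) := by
      funext d w; exact pvStepA_eq word_class d w
    rw [h]
  rw [hfold]
  have hmain := main_lemma (if word_class = 1 then 1 else 0) text [] word_dictionary
    (by split_ifs <;> omega) (by simp) (fun p hp hpt => hpre p hp hpt)
  rw [applyC_nil] at hmain
  exact hmain
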